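-- pv_equiv track=rewrite | github.com/jeanmichael1993/AtividadesPython | Seção04/01/Ex11.py | negativos_e_positivos
-- ===== SOURCE A (Python) =====
-- def negativos_e_positivos(valores: int) -> int:
--     soma: int = 0
--     quantidade: int = 0
--     for x in (valores):
--         if x < 0:
--             quantidade += 1
--         elif x > 0:
--             soma += x
--         else:
--             continue
--     return soma, quantidade
-- ===== SOURCE B (Python) =====
-- def negativos_e_positivos(valores):
--     # Sort, then: negatives form a prefix, positives a suffix.
--     ordenados = sorted(valores)
--     quantidade = 0
--     while quantidade < len(ordenados) and ordenados[quantidade] < 0: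
--         quantidade += 1
--     soma = 0
--     i = len(ordenados) - 1
--     while i >= 0 and ordenados[i] > 0:
--         soma += ordenados[i]
--         i -= 1
--     return soma, quantidade
-- ===== Notes on version B (the rewrite author's own statement) =====
-- stated objective: alternative
-- what changed: Instead of a fused branching scan, B sorts the list and exploits order: it counts the negative prefix and sums the positive suffix of the sorted list (zeros sit untouched in the middle); correct because count and sum are permutation-invariant.
import Mathlib
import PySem

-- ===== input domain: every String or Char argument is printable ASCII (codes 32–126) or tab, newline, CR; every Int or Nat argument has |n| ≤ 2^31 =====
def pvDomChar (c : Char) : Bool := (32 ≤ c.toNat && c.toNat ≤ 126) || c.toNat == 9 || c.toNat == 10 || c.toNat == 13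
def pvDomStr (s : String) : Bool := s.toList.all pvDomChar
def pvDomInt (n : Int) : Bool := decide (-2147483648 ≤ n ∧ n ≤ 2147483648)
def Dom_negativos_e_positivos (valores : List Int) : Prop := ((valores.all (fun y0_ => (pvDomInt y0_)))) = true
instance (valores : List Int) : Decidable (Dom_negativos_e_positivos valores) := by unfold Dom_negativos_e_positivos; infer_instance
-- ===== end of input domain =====

-- B sorts the list and exploits order (negatives form a prefix, positives a suffix) instead of A's fused branching scan; alternative algorithm, same results since count and sum are permutation-invariant.
-- ===== PORT A =====
def negativos_e_positivos (valores : List Int) : Int × Int :=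
  valores.foldl (fun (st : Int × Int) x =>
    if x < 0 then (st.1, st.2 + 1)
    else if x > 0 then (st.1 + x, st.2)
    else st) (0, 0)

-- ===== PORT B =====
-- the first while loop: walk the sorted list from the front while elements are negative
def pvCountNegPrefix : List Int → Int
  | [] => 0
  | x :: t => if x < 0 then pvCountNegPrefix t + 1 else 0

-- the second while loop: walk the sorted list from the back while elements are positive
-- (recursion over the reversed list = index i descending from len-1)
def pvSumPosSuffix : List Int → Int
  | [] => 0
  | x :: t => if x > 0 then pvSumPosSuffix t + x else 0

def negativos_e_positivos_alt (valores : List Int) : Int × Int :=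
  let ordenados := PySem.List.sorted valores (fun x => x) false
  (pvSumPosSuffix ordenados.reverse, pvCountNegPrefix ordenados)

-- ===== PRECONDITION & SPEC =====
def Spec_negativos_e_positivos (valores : List Int) (out : Int × Int) : Prop := out = negativos_e_positivos_alt valores
instance (valores : List Int) (out : Int × Int) : Decidable (Spec_negativos_e_positivos valores out) := by unfold Spec_negativos_e_positivos; infer_instance

-- ===== CLAIM (what is proved, stated in full; the proofs are below) =====
def Claim_equal_negativos_e_positivos : Prop := ∀ (valores : List Int), Dom_negativos_e_positivos valores → Spec_negativos_e_positivos valores (negativos_e_positivos valores)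

-- ===== LEMMAS AND PROOFS =====

-- A's fused loop computes (sum of positives, count of negatives)
lemma fused_eq (valores : List Int) (s q : Int) :
    valores.foldl (fun (st : Int × Int) x =>
      if x < 0 then (st.1, st.2 + 1)
      else if x > 0 then (st.1 + x, st.2)
      else st) (s, q)
    = (s + (valores.filter (fun x => x > 0)).sum,
       q + ((valores.filter (fun x => x < 0)).length : Int)) := by
  induction valores generalizing s q with
  | nil => simp
  | cons a t ih =>
    simp only [List.foldl_cons, List.filter_cons]
    by_cases h1 : a < 0
    · have h2 : ¬ a > 0 := by omega
      simp [h1, h2, ih]; ring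
    · by_cases h2 : a > 0
      · simp [h1, h2, ih]; ring
      · simp [h1, h2, ih]

-- on a (≤)-sorted list, the negative prefix is exactly the negatives
lemma countNegPrefix_eq (L : List Int) (h : L.Pairwise (· ≤ ·)) :
    pvCountNegPrefix L = ((L.filter (fun x => x < 0)).length : Int) := by
  induction L with
  | nil => simp [pvCountNegPrefix]
  | cons a t ih =>
    rcases List.pairwise_cons.mp h with ⟨ha, ht⟩
    by_cases h1 : a < 0
    · simp [pvCountNegPrefix, h1, ih ht]
    · have hnone : t.filter (fun x => x < 0) = [] := by
        apply List.filter_eq_nil_iff.mpr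
        intro x hx
        have := ha x hx
        simp; omega
      simp [pvCountNegPrefix, h1, hnone]

-- on a (≥)-sorted list, the positive prefix is exactly the positives
lemma sumPosSuffix_eq (L : List Int) (h : L.Pairwise (fun a b => b ≤ a)) :
    pvSumPosSuffix L = (L.filter (fun x => x > 0)).sum := by
  induction L with
  | nil => simp [pvSumPosSuffix]
  | cons a t ih =>
    rcases List.pairwise_cons.mp h with ⟨ha, ht⟩
    by_cases h1 : a > 0
    · simp [pvSumPosSuffix, h1, ih ht]; ring
    · have hnone : t.filter (fun x => x > 0) = [] := by
        apply List.filter_eq_nil_iff.mpr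
        intro x hx
        have := ha x hx
        simp; omega
      simp [pvSumPosSuffix, h1, hnone]

-- ===== VERDICT (by name: the statement is the Claim_ definition above) =====
theorem negativos_e_positivos_spec : Claim_equal_negativos_e_positivos := by
  intro valores _
  unfold Spec_negativos_e_positivos negativos_e_positivos negativos_e_positivos_alt
  simp only []
  rw [fused_eq]
  have hperm : (PySem.List.sorted valores (fun x => x) false).Perm valores :=
    PySem.List.sorted_perm valores (fun x => x) false
  have hpw : (PySem.List.sorted valores (fun x => x) false).Pairwise (fun a b => a ≤ b) :=
    PySem.List.sorted_pairwise valores (fun x => x)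
  rw [countNegPrefix_eq _ hpw,
      sumPosSuffix_eq _ (by simpa [List.pairwise_reverse] using hpw)]
  have e1 : ((PySem.List.sorted valores (fun x => x) false).filter (fun x => x > 0)).sum
      = (valores.filter (fun x => x > 0)).sum :=
    (hperm.filter _).sum_eq
  have e2 : ((PySem.List.sorted valores (fun x => x) false).filter (fun x => x < 0)).length
      = (valores.filter (fun x => x < 0)).length :=
    (hperm.filter _).length_eq
  simp [e1, e2]
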